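-- pv_equiv track=rewrite | github.com/Gutiotomas/Analysis-Design-Algorithms | Module_10_Divide_Conquer_1/Problem_C/alexandria_library.py | digits_range
-- ===== SOURCE A (Python) =====
-- def digits_range(start_page, end_page):
--     digit_count = 0
--     current_page = 1
--     digit_length = 1
--
--     while current_page <= end_page:
--         next_page = current_page * 10
--         pages_in_range = min(end_page + 1, next_page) - max(start_page, current_page)
--         if pages_in_range > 0:
--             digit_count += pages_in_range * digit_length
--         current_page = next_page
--         digit_length += 1
--
--     return digit_count
-- ===== SOURCE B (Python) =====
-- def digits_range(start_page, end_page):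
--     def count_up_to(n):
--         # total digits used writing the numbers 1..n (0 if n < 1)
--         if n < 1:
--             return 0
--         d, p = 1, 10
--         while p <= n:
--             d += 1
--             p *= 10
--         return d * (n + 1) - (p - 1) // 9
--     lower = max(start_page, 1)
--     return max(0, count_up_to(end_page) - count_up_to(lower - 1))
-- ===== Notes on version B (the rewrite author's own statement) =====
-- stated objective: alternative
-- what changed: Replaces A's per-magnitude bucket-intersection loop over [start,end] with a prefix-subtraction count_up_to(end) - count_up_to(max(start,1)-1), where count_up_to(n) is the closed form d*(n+1) - (10^d-1)//9 (d = number of digits of n, found by a tiny multiply loop).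
import Mathlib
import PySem

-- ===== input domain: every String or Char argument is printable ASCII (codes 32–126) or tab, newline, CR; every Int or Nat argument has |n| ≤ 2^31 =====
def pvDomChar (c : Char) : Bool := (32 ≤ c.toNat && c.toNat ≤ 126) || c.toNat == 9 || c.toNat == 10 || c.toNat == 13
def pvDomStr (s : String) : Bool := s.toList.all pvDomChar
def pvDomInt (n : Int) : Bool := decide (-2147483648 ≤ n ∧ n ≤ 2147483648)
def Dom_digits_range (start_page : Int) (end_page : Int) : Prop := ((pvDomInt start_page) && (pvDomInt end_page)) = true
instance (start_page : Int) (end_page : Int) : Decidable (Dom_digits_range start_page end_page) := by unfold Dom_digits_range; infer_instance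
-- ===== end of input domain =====

-- B replaces A's bucket-intersection loop with a prefix subtraction of two closed-form
-- digit counts (alternative decomposition, same asymptotic cost).

-- ===== PORT A =====
-- A's while loop; the Nat fuel (64) is only a totality guard: on the stated domain
-- (end_page ≤ 2^31) the loop exits after at most 11 iterations.
def aLoop : Nat → Int → Int → Int → Int → Int → Int
  | 0, _, _, _, _, acc => acc
  | f+1, s, e, cur, len, acc =>
    if cur ≤ e then
      aLoop f s e (cur * 10) (len + 1)
        (if min (e + 1) (cur * 10) - max s cur > 0
         then acc + (min (e + 1) (cur * 10) - max s cur) * len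
         else acc)
    else acc

def digits_range (start_page : Int) (end_page : Int) : Int :=
  aLoop 64 start_page end_page 1 1 0

-- ===== PORT B =====
-- B's digit-count while loop; fuel 64 is only a totality guard (≤ 11 iterations on the domain).
def bLoop : Nat → Int → Int → Int → Int × Int
  | 0, _, d, p => (d, p)
  | f+1, n, d, p => if p ≤ n then bLoop f n (d + 1) (p * 10) else (d, p)

def countUpTo (n : Int) : Int :=
  if n < 1 then 0
  else
    let dp := bLoop 64 n 1 10
    dp.1 * (n + 1) - PySem.Int.floordiv (dp.2 - 1) 9

def digits_range_alt (start_page : Int) (end_page : Int) : Int :=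
  max 0 (countUpTo end_page - countUpTo (max start_page 1 - 1))

-- ===== PRECONDITION & SPEC =====
def Spec_digits_range (start_page : Int) (end_page : Int) (out : Int) : Prop := out = digits_range_alt start_page end_page
instance (start_page : Int) (end_page : Int) (out : Int) : Decidable (Spec_digits_range start_page end_page out) := by unfold Spec_digits_range; infer_instance

-- ===== CLAIM (what is proved, stated in full; the proofs are below) =====
def Claim_equal_digits_range : Prop := ∀ (start_page : Int) (end_page : Int), Dom_digits_range start_page end_page → Spec_digits_range start_page end_page (digits_range start_page end_page)

-- ===== LEMMAS AND PROOFS =====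

-- repunit R d = (10^d - 1)/9
def repunit : Nat → Int
  | 0 => 0
  | d+1 => 10 * repunit d + 1

lemma repunit_mul (d : Nat) : (9 : Int) * repunit d = 10 ^ d - 1 := by
  induction d with
  | zero => simp [repunit]
  | succ d ih => simp only [repunit, pow_succ]; ring_nf; ring_nf at ih; omega

lemma floordiv_repunit (d : Nat) :
    PySem.Int.floordiv ((10 : Int) ^ d - 1) 9 = repunit d := by
  rw [PySem.Int.floordiv_eq_ediv_of_pos (by norm_num), ← repunit_mul d]
  exact Int.mul_ediv_cancel_left _ (by norm_num)

lemma repunit_succ (d : Nat) : repunit (d + 1) = repunit d + 10 ^ d := by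
  have := repunit_mul d
  have := repunit_mul (d + 1)
  have hp : (10 : Int) ^ (d + 1) = 10 * 10 ^ d := by ring
  omega

-- bLoop runs exactly j steps when n lies between p*10^(j-1) and p*10^j
lemma bLoop_eval : ∀ (j f : Nat) (n d p : Int), j ≤ f →
    (∀ i : Nat, i < j → p * 10 ^ i ≤ n) → n < p * 10 ^ j →
    bLoop f n d p = (d + j, p * 10 ^ j) := by
  intro j
  induction j with
  | zero =>
    intro f n d p _ _ hlt
    simp only [pow_zero, mul_one] at hlt
    cases f with
    | zero => simp [bLoop]
    | succ f => simp [bLoop, not_le.mpr hlt]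
  | succ j ih =>
    intro f n d p hjf hlo hlt
    cases f with
    | zero => omega
    | succ f =>
      have h0 : p ≤ n := by have := hlo 0 (by omega); simpa using this
      simp only [bLoop, if_pos h0]
      have := ih f n (d + 1) (p * 10) (by omega)
        (fun i hi => by
          have := hlo (i + 1) (by omega)
          calc p * 10 * 10 ^ i = p * 10 ^ (i + 1) := by ring
          _ ≤ n := this)
        (by calc n < p * 10 ^ (j + 1) := hlt
            _ = p * 10 * 10 ^ j := by ring)
      rw [this]
      simp only [Prod.mk.injEq]
      exact ⟨by push_cast; ring, by ring⟩

-- closed-form evaluation of countUpTo on the band 10^(d-1) ≤ n < 10^d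
lemma countUpTo_band (d : Nat) (n : Int) (hd1 : 1 ≤ d) (hd2 : d ≤ 20)
    (hlo : (10 : Int) ^ (d - 1) ≤ n) (hhi : n < 10 ^ d) :
    countUpTo n = d * (n + 1) - repunit d := by
  have hn1 : (1 : Int) ≤ n := le_trans (one_le_pow₀ (by norm_num)) hlo
  have hloop : bLoop 64 n 1 10 = (1 + ((d - 1 : Nat) : Int), 10 * 10 ^ (d - 1)) := by
    apply bLoop_eval (d - 1) 64 n 1 10 (by omega)
    · intro i hi
      calc (10 : Int) * 10 ^ i = 10 ^ (i + 1) := by ring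
        _ ≤ 10 ^ (d - 1) := by
            apply pow_le_pow_right₀ (by norm_num) (by omega)
        _ ≤ n := hlo
    · calc n < 10 ^ d := hhi
        _ = 10 * 10 ^ (d - 1) := by
            rw [← pow_succ']
            congr 1
            omega
  have hpow : (10 : Int) * 10 ^ (d - 1) = 10 ^ d := by
    rw [← pow_succ']; congr 1; omega
  rw [countUpTo, if_neg (by omega)]
  simp only [hloop, hpow]
  rw [floordiv_repunit d]
  have : (1 : Int) + ((d - 1 : Nat) : Int) = (d : Int) := by
    have : ((d - 1 : Nat) : Int) = (d : Int) - 1 := by omega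
    omega
  rw [this]

lemma countUpTo_of_lt_one (n : Int) (h : n < 1) : countUpTo n = 0 := by
  rw [countUpTo, if_pos h]

-- every 1 ≤ n < 10^12 lies in exactly one band
lemma band_exists (n : Int) (h1 : 1 ≤ n) (h2 : n < 10 ^ 12) :
    ∃ d : Nat, 1 ≤ d ∧ d ≤ 12 ∧ (10 : Int) ^ (d - 1) ≤ n ∧ n < 10 ^ d := by
  by_cases c1 : n < 10
  · exact ⟨1, by norm_num, by norm_num, by simpa using h1, by simpa using c1⟩
  by_cases c2 : n < 100
  · exact ⟨2, by norm_num, by norm_num, by norm_num; omega, by norm_num; omega⟩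
  by_cases c3 : n < 1000
  · exact ⟨3, by norm_num, by norm_num, by norm_num; omega, by norm_num; omega⟩
  by_cases c4 : n < 10000
  · exact ⟨4, by norm_num, by norm_num, by norm_num; omega, by norm_num; omega⟩
  by_cases c5 : n < 100000
  · exact ⟨5, by norm_num, by norm_num, by norm_num; omega, by norm_num; omega⟩
  by_cases c6 : n < 1000000
  · exact ⟨6, by norm_num, by norm_num, by norm_num; omega, by norm_num; omega⟩
  by_cases c7 : n < 10000000
  · exact ⟨7, by norm_num, by norm_num, by norm_num; omega, by norm_num; omega⟩
  by_cases c8 : n < 100000000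
  · exact ⟨8, by norm_num, by norm_num, by norm_num; omega, by norm_num; omega⟩
  by_cases c9 : n < 1000000000
  · exact ⟨9, by norm_num, by norm_num, by norm_num; omega, by norm_num; omega⟩
  by_cases c10 : n < 10000000000
  · exact ⟨10, by norm_num, by norm_num, by norm_num; omega, by norm_num; omega⟩
  by_cases c11 : n < 100000000000
  · exact ⟨11, by norm_num, by norm_num, by norm_num; omega, by norm_num; omega⟩
  · exact ⟨12, by norm_num, by norm_num, by norm_num; omega, by norm_num at h2 ⊢; omega⟩

lemma countUpTo_step (n : Int) (h0 : 0 ≤ n) (h2 : n < 10 ^ 12) :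
    countUpTo n ≤ countUpTo (n + 1) := by
  rcases eq_or_lt_of_le h0 with h | h
  · rw [← h]
    have : countUpTo 0 = 0 := countUpTo_of_lt_one 0 (by norm_num)
    have h1 : countUpTo 1 = 1 := by
      have := countUpTo_band 1 1 (by norm_num) (by norm_num) (by norm_num) (by norm_num)
      simpa [repunit] using this
    simp only [zero_add]
    omega
  · have h1 : (1 : Int) ≤ n := h
    obtain ⟨d, hd1, hd2, hlo, hhi⟩ := band_exists n h1 h2
    by_cases hb : n + 1 < 10 ^ d
    · have e1 := countUpTo_band d n hd1 (by omega) hlo hhi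
      have e2 := countUpTo_band d (n + 1) hd1 (by omega) (by omega) hb
      have : (0 : Int) ≤ (d : Int) := by positivity
      rw [e1, e2]; nlinarith
    · have hn : n + 1 = 10 ^ d := by omega
      have e1 := countUpTo_band d n hd1 (by omega) hlo hhi
      have e2 := countUpTo_band (d + 1) (n + 1) (by omega) (by omega)
        (by simpa using hn.ge) (by rw [hn]; exact pow_lt_pow_right₀ (by norm_num) (by omega))
      rw [e1, e2, repunit_succ, hn]
      push_cast
      nlinarith [pow_pos (show (0:Int) < 10 by norm_num) d]

lemma countUpTo_add_mono : ∀ (m : Nat) (a : Int), 0 ≤ a → a + m < 10 ^ 12 →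
    countUpTo a ≤ countUpTo (a + m) := by
  intro m
  induction m with
  | zero => intro a _ _; simp
  | succ m ih =>
    intro a h0 hub
    have hcast : a + ((m + 1 : Nat) : Int) = a + (m : Int) + 1 := by push_cast; ring
    rw [hcast] at hub ⊢
    have h1 : a + (m : Int) < 10 ^ 12 := by omega
    have h2 := ih a h0 h1
    have h3 := countUpTo_step (a + (m : Int)) (by omega) h1
    omega

lemma countUpTo_mono (a b : Int) (hab : a ≤ b) (hb : b < 10 ^ 11) :
    countUpTo a ≤ countUpTo b := by
  by_cases hb1 : b < 1
  · rw [countUpTo_of_lt_one a (by omega), countUpTo_of_lt_one b hb1]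
  · have ha' : countUpTo a = countUpTo (max a 0) := by
      by_cases ha : a < 1
      · rw [countUpTo_of_lt_one a ha, countUpTo_of_lt_one (max a 0) (by omega)]
      · rw [max_eq_left (by omega)]
    rw [ha']
    have h := countUpTo_add_mono (b - max a 0).toNat (max a 0) (by omega)
      (by norm_num at hb ⊢; omega)
    rw [show (max a 0) + ((b - max a 0).toNat : Int) = b by omega] at h
    exact h

-- band-difference: within one band digits are constant
lemma countUpTo_band_diff (d : Nat) (a b : Int) (hd1 : 1 ≤ d) (hd2 : d ≤ 11)
    (ha : (10 : Int) ^ (d - 1) - 1 ≤ a) (hab : a ≤ b) (hb : b ≤ 10 ^ d - 1) :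
    countUpTo b - countUpTo a = d * (b - a) := by
  rcases eq_or_lt_of_le hab with h | h
  · rw [h]; ring
  · have hblo : (10 : Int) ^ (d - 1) ≤ b := by omega
    have eb := countUpTo_band d b hd1 (by omega) hblo (by omega)
    by_cases halo : (10 : Int) ^ (d - 1) ≤ a
    · have ea := countUpTo_band d a hd1 (by omega) halo (by omega)
      rw [ea, eb]; ring
    · have ha' : a = 10 ^ (d - 1) - 1 := by omega
      rcases Nat.eq_or_lt_of_le hd1 with h1 | h1
      · have hd : d = 1 := h1.symm
        subst hd
        norm_num at ha'
        rw [ha', eb, countUpTo_of_lt_one _ (by norm_num)]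
        norm_num [repunit]
      · have hd2' : 2 ≤ d := h1
        have ea := countUpTo_band (d - 1) a (by omega) (by omega)
          (by rw [ha']
              have : (10:Int) ^ (d - 1 - 1) * 1 ≤ 10 ^ (d - 1 - 1) * 9 := by
                have : (0:Int) < 10 ^ (d - 1 - 1) := by positivity
                nlinarith
              have hsplit : (10:Int) ^ (d - 1) = 10 ^ (d - 1 - 1) * 10 := by
                rw [← pow_succ]; congr 1; omega
              nlinarith [pow_pos (show (0:Int) < 10 by norm_num) (d - 1 - 1)])
          (by omega)
        have hrep : repunit d = repunit (d - 1) + 10 ^ (d - 1) := by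
          have := repunit_succ (d - 1)
          rw [show d - 1 + 1 = d by omega] at this
          exact this
        rw [ea, eb, hrep, ha']
        have hc : ((d - 1 : Nat) : Int) = (d : Int) - 1 := by omega
        rw [hc]
        ring

-- main loop invariant for A
lemma aLoop_eval : ∀ (f k : Nat) (s e acc : Int), k ≤ 10 → s < 10 ^ 10 → e < 10 ^ 10 →
    e < (10 : Int) ^ (k + f) →
    aLoop f s e ((10 : Int) ^ k) ((k : Int) + 1) acc =
      acc + max 0 (countUpTo e - countUpTo (max s ((10 : Int) ^ k) - 1)) := by
  intro f
  induction f with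
  | zero =>
    intro k s e acc hk hs he hef
    simp only [Nat.add_zero] at hef
    have hm : e ≤ max s ((10 : Int) ^ k) - 1 := by omega
    have hub : max s ((10 : Int) ^ k) - 1 < 10 ^ 11 := by
      have : (10 : Int) ^ k ≤ 10 ^ 10 := pow_le_pow_right₀ (by norm_num) hk
      have : (10 : Int) ^ 10 < 10 ^ 11 := by norm_num
      omega
    have := countUpTo_mono e _ hm hub
    simp only [aLoop]
    omega
  | succ f ih =>
    intro k s e acc hk hs he hef
    by_cases hce : (10 : Int) ^ k ≤ e
    · -- loop iterates
      have hk9 : k ≤ 9 := by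
        by_contra hc
        have hk10 : k = 10 := by omega
        subst hk10
        norm_num at hce he
        omega
      have hX : (10 : Int) ^ k * 10 = 10 ^ (k + 1) := by rw [pow_succ]
      simp only [aLoop, if_pos hce]
      rw [hX, show ((k : Int) + 1) + 1 = (((k + 1 : Nat)) : Int) + 1 by push_cast; ring]
      rw [ih (k + 1) s e _ (by omega) hs he (by rw [show k + 1 + f = k + (f + 1) by omega]; exact hef)]
      -- now pure arithmetic about one bucket
      set cur : Int := (10 : Int) ^ k with hcur
      have hcurpos : (1 : Int) ≤ cur := one_le_pow₀ (by norm_num)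
      have hXval : (10 : Int) ^ (k + 1) = 10 * cur := by rw [pow_succ]; ring
      set m : Int := max s cur with hm
      have hmcur : cur ≤ m := le_max_right _ _
      have hcurX : cur < 10 ^ (k + 1) := by rw [hXval]; omega
      have hXub : (10 : Int) ^ (k + 1) ≤ 10 ^ 10 := pow_le_pow_right₀ (by norm_num) (by omega)
      by_cases hsX : (10 : Int) ^ (k + 1) ≤ s
      · -- (i) start beyond next bucket boundary
        have hmax : max s ((10 : Int) ^ (k + 1)) = s := max_eq_left hsX
        have hms : m = s := by rw [hm]; exact max_eq_left (by omega)
        rw [hmax, hms]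
        rw [if_neg (by omega)]
      · push Not at hsX
        have hmax : max s ((10 : Int) ^ (k + 1)) = 10 ^ (k + 1) := max_eq_right (by omega)
        rw [hmax]
        have h1011 : (10 : Int) ^ 10 < 10 ^ 11 := by norm_num
        by_cases hem : e < m
        · -- (ii-a) remaining range starts past e: bucket empty, both sides clamp to 0
          have h1 : countUpTo e ≤ countUpTo (m - 1) :=
            countUpTo_mono _ _ (by omega) (by omega)
          have h2 : countUpTo e ≤ countUpTo ((10 : Int) ^ (k + 1) - 1) :=
            countUpTo_mono _ _ (by omega) (by omega)
          rw [if_neg (by omega)]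
          omega
        · push Not at hem
          by_cases heX : e < (10 : Int) ^ (k + 1)
          · -- (ii-b) e inside current bucket
            have hbd := countUpTo_band_diff (k + 1) (m - 1) e (by omega) (by omega)
              (by rw [show k + 1 - 1 = k from rfl]; omega) (by omega) (by omega)
            have hkey : countUpTo e - countUpTo (m - 1) = ((k : Int) + 1) * (e + 1 - m) := by
              rw [hbd]; push_cast; ring
            have h2 : countUpTo e ≤ countUpTo ((10 : Int) ^ (k + 1) - 1) :=
              countUpTo_mono _ _ (by omega) (by omega)
            have hpos : (0 : Int) < ((k : Int) + 1) * (e + 1 - m) :=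
              mul_pos (by positivity) (by omega)
            rw [if_pos (by omega),
              show (min (e + 1) ((10 : Int) ^ (k + 1)) - m) * ((k : Int) + 1)
                  = ((k : Int) + 1) * (e + 1 - m) from by
                rw [min_eq_left (by omega)]; ring]
            omega
          · -- (ii-c) e at or beyond the next bucket boundary
            push Not at heX
            have hbd := countUpTo_band_diff (k + 1) (m - 1) ((10 : Int) ^ (k + 1) - 1)
              (by omega) (by omega)
              (by rw [show k + 1 - 1 = k from rfl]; omega)
              (by omega) (by omega)
            have hkey : countUpTo ((10 : Int) ^ (k + 1) - 1) - countUpTo (m - 1)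
                = ((k : Int) + 1) * ((10 : Int) ^ (k + 1) - m) := by
              rw [hbd]; push_cast; ring
            have h2 : countUpTo ((10 : Int) ^ (k + 1) - 1) ≤ countUpTo e :=
              countUpTo_mono _ _ (by omega) (by omega)
            have hpos : (0 : Int) < ((k : Int) + 1) * ((10 : Int) ^ (k + 1) - m) :=
              mul_pos (by positivity) (by omega)
            rw [if_pos (by omega),
              show (min (e + 1) ((10 : Int) ^ (k + 1)) - m) * ((k : Int) + 1)
                  = ((k : Int) + 1) * ((10 : Int) ^ (k + 1) - m) from by
                rw [min_eq_right (by omega)]; ring]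
            omega
    · -- loop exits immediately
      push Not at hce
      have hm : e ≤ max s ((10 : Int) ^ k) - 1 := by
        have : (10 : Int) ^ k ≤ max s ((10 : Int) ^ k) := le_max_right _ _
        omega
      have hub : max s ((10 : Int) ^ k) - 1 < 10 ^ 11 := by
        have h1 : (10 : Int) ^ k ≤ 10 ^ 10 := pow_le_pow_right₀ (by norm_num) hk
        have : (10 : Int) ^ 10 < 10 ^ 11 := by norm_num
        omega
      have := countUpTo_mono e _ hm hub
      simp only [aLoop, if_neg (not_le.mpr hce)]
      omega

-- ===== VERDICT (by name: the statement is the Claim_ definition above) =====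
theorem digits_range_spec : Claim_equal_digits_range := by
  intro s e hdom
  unfold Dom_digits_range pvDomInt at hdom
  simp only [Bool.and_eq_true, decide_eq_true_eq] at hdom
  obtain ⟨⟨_, hs2⟩, ⟨_, he2⟩⟩ := hdom
  unfold Spec_digits_range digits_range digits_range_alt
  have h := aLoop_eval 64 0 s e 0 (by norm_num) (by norm_num; omega) (by norm_num; omega)
    (by norm_num; omega)
  simp only [pow_zero, Nat.cast_zero, zero_add] at h
  exact h
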